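-- pv_equiv track=rewrite | github.com/jshaik369/sexdiffkg-deep-analysis | scripts/audit_data_lineage.py | identify_entity_source
-- ===== SOURCE A (Python) =====
-- def identify_entity_source(entity_id: str) -> str:
--     """Identify the source of an entity based on its ID prefix."""
--     if entity_id.startswith("CHEMBL"):
--         return "ChEMBL"
--     elif entity_id.startswith("ENSG"):
--         return "Ensembl"
--     elif entity_id.startswith("UP:"):
--         return "UniProt"
--     elif entity_id.startswith("REACT"):
--         return "Reactome"
--     elif entity_id.startswith("KEGG:"):
--         return "KEGG"
--     elif entity_id.startswith("GTEX:"):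
--         return "GTEx"
--     elif entity_id.startswith("FAERS:"):
--         return "FAERS"
--     elif entity_id.startswith("STRING:"):
--         return "STRING"
--     elif any(entity_id.startswith(prefix) for prefix in ["GO:", "HP:", "DOID:", "MONDO:"]):
--         return "Ontology"
--     else:
--         return "Unknown"
-- ===== SOURCE B (Python) =====
-- # B: dispatch on the first character through a dict of buckets instead of a
-- # linear if-elif cascade; correct because A's prefixes sharing a first letter
-- # (GTEX:, GO:) are kept in A's order and no prefix is a prefix of another.
-- _BY_FIRST = {
--     "C": [("CHEMBL", "ChEMBL")],
--     "E": [("ENSG", "Ensembl")],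
--     "U": [("UP:", "UniProt")],
--     "R": [("REACT", "Reactome")],
--     "K": [("KEGG:", "KEGG")],
--     "G": [("GTEX:", "GTEx"), ("GO:", "Ontology")],
--     "F": [("FAERS:", "FAERS")],
--     "S": [("STRING:", "STRING")],
--     "H": [("HP:", "Ontology")],
--     "D": [("DOID:", "Ontology")],
--     "M": [("MONDO:", "Ontology")],
-- }
--
-- def identify_entity_source(entity_id: str) -> str:
--     """Identify the source of an entity based on its ID prefix."""
--     for prefix, source in _BY_FIRST.get(entity_id[:1], []):
--         if entity_id.startswith(prefix):
--             return source
--     return "Unknown"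
-- ===== Notes on version B (the rewrite author's own statement) =====
-- stated objective: alternative
-- what changed: Replaces the unrolled 12-prefix if-elif cascade by a hash dispatch on the ID's first character: a dict maps the first character to its (at most two) candidate (prefix, source) pairs, so only those candidates are tested; correct because prefixes sharing a first letter (GTEX:, GO:) keep A's order and no prefix is a prefix of another.
import Mathlib
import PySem

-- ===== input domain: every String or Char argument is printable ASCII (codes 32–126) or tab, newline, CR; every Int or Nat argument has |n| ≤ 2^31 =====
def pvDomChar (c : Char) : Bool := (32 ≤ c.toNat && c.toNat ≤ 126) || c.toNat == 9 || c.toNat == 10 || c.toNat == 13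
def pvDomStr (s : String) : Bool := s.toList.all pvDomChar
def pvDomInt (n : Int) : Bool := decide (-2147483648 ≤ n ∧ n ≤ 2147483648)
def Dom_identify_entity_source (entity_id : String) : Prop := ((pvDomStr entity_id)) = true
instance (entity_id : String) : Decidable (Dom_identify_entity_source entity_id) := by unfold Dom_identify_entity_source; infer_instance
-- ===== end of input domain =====

-- B replaces A's unrolled if-elif cascade by a dict dispatch on the ID's first character,
-- testing only the (at most two) prefixes starting with that character (alternative; same cost).

-- ===== PORT A =====
def identify_entity_source (entity_id : String) : String :=
  if PySem.Str.startswith entity_id "CHEMBL" then "ChEMBL"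
  else if PySem.Str.startswith entity_id "ENSG" then "Ensembl"
  else if PySem.Str.startswith entity_id "UP:" then "UniProt"
  else if PySem.Str.startswith entity_id "REACT" then "Reactome"
  else if PySem.Str.startswith entity_id "KEGG:" then "KEGG"
  else if PySem.Str.startswith entity_id "GTEX:" then "GTEx"
  else if PySem.Str.startswith entity_id "FAERS:" then "FAERS"
  else if PySem.Str.startswith entity_id "STRING:" then "STRING"
  else if (["GO:", "HP:", "DOID:", "MONDO:"].any (fun pfx => PySem.Str.startswith entity_id pfx)) then "Ontology"
  else "Unknown"

-- ===== PORT B =====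
-- the _BY_FIRST dict: first character (as a 1-character string) -> candidate (prefix, source) pairs
def pvByFirst : PySem.Dict String (List (String × String)) :=
  PySem.Dict.ofList
    [("C", [("CHEMBL", "ChEMBL")]),
     ("E", [("ENSG", "Ensembl")]),
     ("U", [("UP:", "UniProt")]),
     ("R", [("REACT", "Reactome")]),
     ("K", [("KEGG:", "KEGG")]),
     ("G", [("GTEX:", "GTEx"), ("GO:", "Ontology")]),
     ("F", [("FAERS:", "FAERS")]),
     ("S", [("STRING:", "STRING")]),
     ("H", [("HP:", "Ontology")]),
     ("D", [("DOID:", "Ontology")]),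
     ("M", [("MONDO:", "Ontology")])]

-- the 'for prefix, source in …: if entity_id.startswith(prefix): return source' loop
def pvScanBucket (entity_id : String) : List (String × String) → String
  | [] => "Unknown"
  | (pfx, src) :: rest =>
      if PySem.Str.startswith entity_id pfx then src else pvScanBucket entity_id rest

def identify_entity_source_alt (entity_id : String) : String :=
  pvScanBucket entity_id
    (PySem.Dict.getD pvByFirst (PySem.Str.slice entity_id none (some 1)) [])

-- ===== PRECONDITION & SPEC =====
def Spec_identify_entity_source (entity_id : String) (out : String) : Prop := out = identify_entity_source_alt entity_id
instance (entity_id : String) (out : String) : Decidable (Spec_identify_entity_source entity_id out) := by unfold Spec_identify_entity_source; infer_instance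

-- ===== CLAIM (what is proved, stated in full; the proofs are below) =====
def Claim_equal_identify_entity_source : Prop := ∀ (entity_id : String), Dom_identify_entity_source entity_id → Spec_identify_entity_source entity_id (identify_entity_source entity_id)

-- ===== LEMMAS AND PROOFS =====

-- ofList deduplicates nothing here (all 11 keys distinct): the dict is the literal list
theorem pvByFirst_mk : pvByFirst = PySem.Dict.mk
    [("C", [("CHEMBL", "ChEMBL")]), ("E", [("ENSG", "Ensembl")]), ("U", [("UP:", "UniProt")]),
     ("R", [("REACT", "Reactome")]), ("K", [("KEGG:", "KEGG")]),
     ("G", [("GTEX:", "GTEx"), ("GO:", "Ontology")]), ("F", [("FAERS:", "FAERS")]),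
     ("S", [("STRING:", "STRING")]), ("H", [("HP:", "Ontology")]), ("D", [("DOID:", "Ontology")]),
     ("M", [("MONDO:", "Ontology")])] := by decide

-- the eleven bucket lookups, one per dispatch character
theorem pv_bucket_C : PySem.Dict.getD pvByFirst "C" [] = [("CHEMBL", "ChEMBL")] := by decide
theorem pv_bucket_E : PySem.Dict.getD pvByFirst "E" [] = [("ENSG", "Ensembl")] := by decide
theorem pv_bucket_U : PySem.Dict.getD pvByFirst "U" [] = [("UP:", "UniProt")] := by decide
theorem pv_bucket_R : PySem.Dict.getD pvByFirst "R" [] = [("REACT", "Reactome")] := by decide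
theorem pv_bucket_K : PySem.Dict.getD pvByFirst "K" [] = [("KEGG:", "KEGG")] := by decide
theorem pv_bucket_G : PySem.Dict.getD pvByFirst "G" [] = [("GTEX:", "GTEx"), ("GO:", "Ontology")] := by decide
theorem pv_bucket_F : PySem.Dict.getD pvByFirst "F" [] = [("FAERS:", "FAERS")] := by decide
theorem pv_bucket_S : PySem.Dict.getD pvByFirst "S" [] = [("STRING:", "STRING")] := by decide
theorem pv_bucket_H : PySem.Dict.getD pvByFirst "H" [] = [("HP:", "Ontology")] := by decide
theorem pv_bucket_D : PySem.Dict.getD pvByFirst "D" [] = [("DOID:", "Ontology")] := by decide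
theorem pv_bucket_M : PySem.Dict.getD pvByFirst "M" [] = [("MONDO:", "Ontology")] := by decide

theorem pv_key_ne_lit (s : String) (a c : Char) (hs : s.toList = [a]) (h : c ≠ a) :
    (s == String.ofList [c]) = false := by
  rw [beq_eq_false_iff_ne]
  intro hEq
  apply h
  have := congrArg String.toList hEq
  rw [hs, String.toList_ofList] at this
  exact (List.cons.inj this).1.symm

-- a character outside the dispatch set hits no bucket
theorem pv_bucket_other (c : Char)
    (h1 : c ≠ 'C') (h2 : c ≠ 'E') (h3 : c ≠ 'U') (h4 : c ≠ 'R') (h5 : c ≠ 'K') (h6 : c ≠ 'G')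
    (h7 : c ≠ 'F') (h8 : c ≠ 'S') (h9 : c ≠ 'H') (h10 : c ≠ 'D') (h11 : c ≠ 'M') :
    PySem.Dict.getD pvByFirst (String.ofList [c]) [] = [] := by
  rw [pvByFirst_mk]
  simp [PySem.Dict.getD, PySem.Dict.get?,
        pv_key_ne_lit "C" 'C' c (by decide) h1, pv_key_ne_lit "E" 'E' c (by decide) h2,
        pv_key_ne_lit "U" 'U' c (by decide) h3, pv_key_ne_lit "R" 'R' c (by decide) h4,
        pv_key_ne_lit "K" 'K' c (by decide) h5, pv_key_ne_lit "G" 'G' c (by decide) h6,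
        pv_key_ne_lit "F" 'F' c (by decide) h7, pv_key_ne_lit "S" 'S' c (by decide) h8,
        pv_key_ne_lit "H" 'H' c (by decide) h9, pv_key_ne_lit "D" 'D' c (by decide) h10,
        pv_key_ne_lit "M" 'M' c (by decide) h11]

-- ===== VERDICT (by name: the statement is the Claim_ definition above) =====
theorem identify_entity_source_spec : Claim_equal_identify_entity_source := by
  intro e _
  unfold Spec_identify_entity_source
  have he : e = String.ofList e.toList := by simp
  cases hcs : e.toList with
  | nil =>
      have : e = "" := by rw [he, hcs]
      subst this; decide
  | cons c rest =>
      rw [he, hcs]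
      by_cases h1 : c = 'C'
      · subst h1
        simp [identify_entity_source, identify_entity_source_alt, pv_bucket_C, pvScanBucket,
              PySem.Str.startswith, PySem.Str.slice, PySem.Chars.startswith,
              PySem.List.slice, List.isPrefixOf]
      · by_cases h2 : c = 'E'
        · subst h2
          simp [identify_entity_source, identify_entity_source_alt, pv_bucket_E, pvScanBucket,
                PySem.Str.startswith, PySem.Str.slice, PySem.Chars.startswith,
                PySem.List.slice, List.isPrefixOf]
        · by_cases h3 : c = 'U'
          · subst h3
            simp [identify_entity_source, identify_entity_source_alt, pv_bucket_U, pvScanBucket,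
                  PySem.Str.startswith, PySem.Str.slice, PySem.Chars.startswith,
                  PySem.List.slice, List.isPrefixOf]
          · by_cases h4 : c = 'R'
            · subst h4
              simp [identify_entity_source, identify_entity_source_alt, pv_bucket_R, pvScanBucket,
                    PySem.Str.startswith, PySem.Str.slice, PySem.Chars.startswith,
                    PySem.List.slice, List.isPrefixOf]
            · by_cases h5 : c = 'K'
              · subst h5
                simp [identify_entity_source, identify_entity_source_alt, pv_bucket_K, pvScanBucket,
                      PySem.Str.startswith, PySem.Str.slice, PySem.Chars.startswith,
                      PySem.List.slice, List.isPrefixOf]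
              · by_cases h6 : c = 'G'
                · subst h6
                  simp [identify_entity_source, identify_entity_source_alt, pv_bucket_G, pvScanBucket,
                        PySem.Str.startswith, PySem.Str.slice, PySem.Chars.startswith,
                        PySem.List.slice, List.isPrefixOf]
                · by_cases h7 : c = 'F'
                  · subst h7
                    simp [identify_entity_source, identify_entity_source_alt, pv_bucket_F, pvScanBucket,
                          PySem.Str.startswith, PySem.Str.slice, PySem.Chars.startswith,
                          PySem.List.slice, List.isPrefixOf]
                  · by_cases h8 : c = 'S'
                    · subst h8
                      simp [identify_entity_source, identify_entity_source_alt, pv_bucket_S, pvScanBucket,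
                            PySem.Str.startswith, PySem.Str.slice, PySem.Chars.startswith,
                            PySem.List.slice, List.isPrefixOf]
                    · by_cases h9 : c = 'H'
                      · subst h9
                        simp [identify_entity_source, identify_entity_source_alt, pv_bucket_H, pvScanBucket,
                              PySem.Str.startswith, PySem.Str.slice, PySem.Chars.startswith,
                              PySem.List.slice, List.isPrefixOf]
                      · by_cases h10 : c = 'D'
                        · subst h10
                          simp [identify_entity_source, identify_entity_source_alt, pv_bucket_D, pvScanBucket,
                                PySem.Str.startswith, PySem.Str.slice, PySem.Chars.startswith,
                                PySem.List.slice, List.isPrefixOf]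
                        · by_cases h11 : c = 'M'
                          · subst h11
                            simp [identify_entity_source, identify_entity_source_alt, pv_bucket_M, pvScanBucket,
                                  PySem.Str.startswith, PySem.Str.slice, PySem.Chars.startswith,
                                  PySem.List.slice, List.isPrefixOf]
                          · simp [identify_entity_source, identify_entity_source_alt,
                                  pv_bucket_other c h1 h2 h3 h4 h5 h6 h7 h8 h9 h10 h11, pvScanBucket,
                                  PySem.Str.startswith, PySem.Str.slice, PySem.Chars.startswith,
                                  PySem.List.slice, List.isPrefixOf,
                                  Ne.symm h1, Ne.symm h2, Ne.symm h3, Ne.symm h4, Ne.symm h5, Ne.symm h6,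
                                  Ne.symm h7, Ne.symm h8, Ne.symm h9, Ne.symm h10, Ne.symm h11]
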